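-- pv_equiv track=rewrite | github.com/CoPhi/mt2iwn | scripts/similarity/scoring.py | get_fallback_gloss
-- ===== SOURCE A (Python) =====
-- def get_fallback_gloss(term, fallback_type='near_synonym'):
--     # If a Word Meaning does not have a gloss, a fallback one is used. Check the primary fallback type first
--     for relation_type in [fallback_type, 'near_xpos_synonym', 'has_hyponym', 'has_hyperonym']:
--         for rel in term.get('relations', []):
--             if rel.get('relation_type') == relation_type:
--                 target_gloss = rel.get('target_gloss', '')
--                 if target_gloss == "No Gloss":
--                     target_gloss = ''  # Replace "No Gloss" with an empty string for comparison
--                 if target_gloss: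
--                     return target_gloss, relation_type
--     return '', None  # If no valid fallback is found
-- ===== SOURCE B (Python) =====
-- def get_fallback_gloss(term, fallback_type='near_synonym'):
--     # One pass over relations building a first-valid-gloss index, then priority lookups.
--     first = {}
--     for rel in term.get('relations', []):
--         gloss = rel.get('target_gloss', '')
--         if gloss == "No Gloss":
--             gloss = ''
--         rt = rel.get('relation_type')
--         if gloss and rt not in first:
--             first[rt] = gloss
--     for relation_type in (fallback_type, 'near_xpos_synonym', 'has_hyponym', 'has_hyperonym'):
--         if relation_type in first:
--             return first[relation_type], relation_type
--     return '', None
-- ===== Notes on version B (the rewrite author's own statement) =====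
-- stated objective: alternative
-- what changed: A rescans the relations list once per relation type (up to four passes with an early return); B makes a single pass building a dict from relation type to its first valid cleaned gloss, then answers with four constant-time lookups in priority order.
import Mathlib
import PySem

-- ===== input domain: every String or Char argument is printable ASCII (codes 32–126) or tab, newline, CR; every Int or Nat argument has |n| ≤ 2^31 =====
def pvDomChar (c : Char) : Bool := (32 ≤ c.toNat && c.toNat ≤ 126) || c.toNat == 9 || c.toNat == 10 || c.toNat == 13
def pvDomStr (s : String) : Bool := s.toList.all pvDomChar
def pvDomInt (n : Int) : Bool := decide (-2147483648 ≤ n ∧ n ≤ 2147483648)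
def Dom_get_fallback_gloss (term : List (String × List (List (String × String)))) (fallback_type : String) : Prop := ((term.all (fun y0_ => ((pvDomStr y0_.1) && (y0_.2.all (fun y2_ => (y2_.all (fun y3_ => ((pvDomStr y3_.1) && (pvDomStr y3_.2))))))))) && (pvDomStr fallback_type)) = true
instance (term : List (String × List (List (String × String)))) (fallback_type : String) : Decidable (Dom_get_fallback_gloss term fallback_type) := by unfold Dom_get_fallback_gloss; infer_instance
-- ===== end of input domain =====

-- B replaces A's four restarted scans over the relations with one pass building a
-- first-valid-gloss index per relation type, then four constant lookups (alternative decomposition).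


-- ===== PORT A =====
-- inner loop of A: scan the relations for the first one of type t with a truthy cleaned gloss
def pvFindRel (rels : List (List (String × String))) (t : String) : Option (String × Option String) :=
  match rels with
  | [] => none
  | rel :: rest =>
    if (PySem.Dict.mk rel).get? "relation_type" = some t then
      let target_gloss := (PySem.Dict.mk rel).getD "target_gloss" ""
      let target_gloss := if target_gloss = "No Gloss" then "" else target_gloss
      if target_gloss ≠ "" then some (target_gloss, some t) else pvFindRel rest t
    else pvFindRel rest t

-- outer loop of A over the priority-ordered relation types
def pvOuter (rels : List (List (String × String))) : List String → String × Option String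
  | [] => ("", none)
  | t :: ts =>
    match pvFindRel rels t with
    | some r => r
    | none => pvOuter rels ts

def get_fallback_gloss (term : List (String × List (List (String × String)))) (fallback_type : String) : String × Option String :=
  pvOuter ((PySem.Dict.mk term).getD "relations" [])
    [fallback_type, "near_xpos_synonym", "has_hyponym", "has_hyperonym"]

-- ===== PORT B =====
-- B's first loop: one pass recording, per relation type key, the first truthy cleaned gloss
def pvFirstIndex (rels : List (List (String × String))) : PySem.Dict (Option String) String :=
  rels.foldl (fun first rel =>
    let gloss := (PySem.Dict.mk rel).getD "target_gloss" ""
    let gloss := if gloss = "No Gloss" then "" else gloss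
    let rt := (PySem.Dict.mk rel).get? "relation_type"
    if gloss ≠ "" ∧ first.contains rt = false then first.insert rt gloss else first)
    PySem.Dict.empty

-- B's second loop: return the indexed gloss of the first present relation type
def pvPick (first : PySem.Dict (Option String) String) : List String → String × Option String
  | [] => ("", none)
  | t :: ts =>
    match first.get? (some t) with
    | some g => (g, some t)
    | none => pvPick first ts

def get_fallback_gloss_alt (term : List (String × List (List (String × String)))) (fallback_type : String) : String × Option String :=
  pvPick (pvFirstIndex ((PySem.Dict.mk term).getD "relations" []))
    [fallback_type, "near_xpos_synonym", "has_hyponym", "has_hyperonym"]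

-- ===== PRECONDITION & SPEC =====
def Spec_get_fallback_gloss (term : List (String × List (List (String × String)))) (fallback_type : String) (out : String × Option String) : Prop := out = get_fallback_gloss_alt term fallback_type
instance (term : List (String × List (List (String × String)))) (fallback_type : String) (out : String × Option String) : Decidable (Spec_get_fallback_gloss term fallback_type out) := by unfold Spec_get_fallback_gloss; infer_instance

-- ===== CLAIM (what is proved, stated in full; the proofs are below) =====
def Claim_equal_get_fallback_gloss : Prop := ∀ (term : List (String × List (List (String × String)))) (fallback_type : String), Dom_get_fallback_gloss term fallback_type → Spec_get_fallback_gloss term fallback_type (get_fallback_gloss term fallback_type)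

-- ===== LEMMAS AND PROOFS =====

-- first valid gloss in rels whose relation_type key equals k (proof-only reference function)
def pvGlossOf? (rels : List (List (String × String))) (k : Option String) : Option String :=
  match rels with
  | [] => none
  | rel :: rest =>
    let gloss := (PySem.Dict.mk rel).getD "target_gloss" ""
    let gloss := if gloss = "No Gloss" then "" else gloss
    if gloss ≠ "" ∧ (PySem.Dict.mk rel).get? "relation_type" = k then some gloss
    else pvGlossOf? rest k

theorem pvFirstIndex_get? (rels : List (List (String × String))) :
    ∀ (d : PySem.Dict (Option String) String) (k : Option String),
      (rels.foldl (fun first rel =>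
        let gloss := (PySem.Dict.mk rel).getD "target_gloss" ""
        let gloss := if gloss = "No Gloss" then "" else gloss
        let rt := (PySem.Dict.mk rel).get? "relation_type"
        if gloss ≠ "" ∧ first.contains rt = false then first.insert rt gloss else first) d).get? k
      = ((d.get? k).orElse (fun _ => pvGlossOf? rels k)) := by
  induction rels with
  | nil =>
    intro d k
    simp only [List.foldl_nil, pvGlossOf?]
    cases d.get? k <;> simp [Option.orElse]
  | cons rel rest ih =>
    intro d k
    rw [List.foldl_cons, ih]
    set g := (if (PySem.Dict.mk rel).getD "target_gloss" "" = "No Gloss" then ""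
        else (PySem.Dict.mk rel).getD "target_gloss" "") with hgdef
    set rt := (PySem.Dict.mk rel).get? "relation_type" with hrtdef
    have hglossOf : pvGlossOf? (rel :: rest) k
        = if g ≠ "" ∧ rt = k then some g else pvGlossOf? rest k := rfl
    have hbody : (let gloss := (PySem.Dict.mk rel).getD "target_gloss" ""
        let gloss := if gloss = "No Gloss" then "" else gloss
        let rt := (PySem.Dict.mk rel).get? "relation_type"
        if gloss ≠ "" ∧ d.contains rt = false then d.insert rt gloss else d)
        = if g ≠ "" ∧ d.contains rt = false then d.insert rt g else d := rfl
    rw [hbody]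
    by_cases hg : g ≠ ""
    · by_cases hc : d.contains rt = false
      · rw [if_pos ⟨hg, hc⟩]
        have hnone : d.get? rt = none := by
          have hce := PySem.Dict.contains_eq_isSome_get? (d := d) (k := rt)
          rw [hce] at hc
          cases h : d.get? rt <;> simp [h] at hc ⊢
        by_cases hk : k = rt
        · subst hk
          rw [PySem.Dict.get?_insert_self, hnone, hglossOf, if_pos ⟨hg, rfl⟩]
          simp [Option.orElse]
        · rw [PySem.Dict.get?_insert_of_ne _ _ hk, hglossOf,
            if_neg (fun h => hk h.2.symm)]
      · rw [if_neg (fun h => hc h.2), hglossOf]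
        by_cases hk : k = rt
        · subst hk
          have hsome : ∃ v, d.get? rt = some v := by
            have hce := PySem.Dict.contains_eq_isSome_get? (d := d) (k := rt)
            rw [hce] at hc
            cases h : d.get? rt <;> simp [h] at hc ⊢
          obtain ⟨v, hv⟩ := hsome
          rw [hv]
          simp [Option.orElse]
        · rw [if_neg (fun h => hk h.2.symm)]
    · rw [if_neg (fun h => hg h.1), hglossOf, if_neg (fun h => hg h.1)]

theorem pvFindRel_eq_glossOf (rels : List (List (String × String))) (t : String) :
    pvFindRel rels t = (pvGlossOf? rels (some t)).map (fun g => (g, some t)) := by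
  induction rels with
  | nil => simp [pvFindRel, pvGlossOf?]
  | cons rel rest ih =>
    simp only [pvFindRel, pvGlossOf?]
    by_cases ht : (PySem.Dict.mk rel).get? "relation_type" = some t
    · by_cases hg : (if (PySem.Dict.mk rel).getD "target_gloss" "" = "No Gloss" then ""
          else (PySem.Dict.mk rel).getD "target_gloss" "") ≠ ""
      · simp [ht, hg]
      · simp [ht, hg, ih]
    · simp [ht, ih]

theorem pvOuter_eq_pick (rels : List (List (String × String))) (ts : List String) :
    pvOuter rels ts = pvPick (pvFirstIndex rels) ts := by
  induction ts with
  | nil => simp [pvOuter, pvPick]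
  | cons t ts ih =>
    simp only [pvOuter, pvPick]
    have hidx : (pvFirstIndex rels).get? (some t) = pvGlossOf? rels (some t) := by
      have := pvFirstIndex_get? rels PySem.Dict.empty (some t)
      simpa [pvFirstIndex, PySem.Dict.get?_empty, Option.orElse] using this
    rw [hidx, pvFindRel_eq_glossOf]
    cases pvGlossOf? rels (some t) <;> simp [ih]

-- ===== VERDICT (by name: the statement is the Claim_ definition above) =====
theorem get_fallback_gloss_spec : Claim_equal_get_fallback_gloss := by
  intro term fallback_type _
  show get_fallback_gloss term fallback_type = get_fallback_gloss_alt term fallback_type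
  unfold get_fallback_gloss get_fallback_gloss_alt
  exact pvOuter_eq_pick _ _
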